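-- pv_equiv track=rewrite | github.com/CryAndRRich/hustack | leetcode/binary_search/3520_Minimum_Threshold_for_Inversion_Pairs_Count/codes/bs.py | minThreshold
-- ===== SOURCE A (Python) =====
-- from typing import List
-- import bisect
--
-- class Fenwick:
--     def __init__(self, n: int):
--         self.n = n
--         self.bit = [0] * (n + 1)
--     def update(self, idx: int, delta: int):
--         i = idx + 1
--         while i <= self.n:
--             self.bit[i] += delta
--             i += i & -i
--     def query(self, idx: int) -> int:
--         if idx < 0: return 0
--         i = idx + 1
--         s = 0
--         while i > 0:
--             s += self.bit[i]
--             i -= i & -i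
--         return s
--     def range_query(self, l: int, r: int) -> int:
--         if l > r: return 0
--         return self.query(r) - self.query(l - 1)
--
-- def minThreshold(nums: List[int], k: int) -> int:
--     if not nums: return -1
--     vals = sorted(set(nums))
--     m = len(vals)
--
--     def check(th: int) -> bool:
--         fw = Fenwick(m)
--         cnt = 0
--         for num in nums:
--             idx_l = bisect.bisect_right(vals, num)
--             idx_r = bisect.bisect_right(vals, num + th) - 1
--             if idx_l <= idx_r:
--                 cnt += fw.range_query(idx_l, idx_r)
--                 if cnt >= k:
--                     return True
--             idx_num = bisect.bisect_left(vals, num)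
--             fw.update(idx_num, 1)
--         return cnt >= k
--
--     lo, hi = 0, max(nums) - min(nums)
--     ans = -1
--     while lo <= hi:
--         mid = (lo + hi) // 2
--         if check(mid):
--             ans = mid
--             hi = mid - 1
--         else:
--             lo = mid + 1
--     return ans
-- ===== SOURCE B (Python) =====
-- from typing import List
-- import bisect
--
-- def _check(nums: List[int], k: int, th: int) -> bool:
--     seen = []
--     cnt = 0
--     for num in nums:
--         cnt += bisect.bisect_right(seen, num + th) - bisect.bisect_right(seen, num)
--         if cnt >= k:
--             return True
--         bisect.insort(seen, num)
--     return cnt >= k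
--
-- def minThreshold(nums: List[int], k: int) -> int:
--     if not nums:
--         return -1
--     lo, hi = 0, max(nums) - min(nums)
--     ans = -1
--     while lo <= hi:
--         mid = (lo + hi) // 2
--         if _check(nums, k, mid):
--             ans = mid
--             hi = mid - 1
--         else:
--             lo = mid + 1
--     return ans
-- ===== Notes on version B (the rewrite author's own statement) =====
-- stated objective: simpler
-- what changed: check() maintains a plain sorted list of the already-seen values queried with bisect_right, instead of a Fenwick tree over compressed coordinates; the vals/compression step and the Fenwick class are dropped entirely.
import Mathlib
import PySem

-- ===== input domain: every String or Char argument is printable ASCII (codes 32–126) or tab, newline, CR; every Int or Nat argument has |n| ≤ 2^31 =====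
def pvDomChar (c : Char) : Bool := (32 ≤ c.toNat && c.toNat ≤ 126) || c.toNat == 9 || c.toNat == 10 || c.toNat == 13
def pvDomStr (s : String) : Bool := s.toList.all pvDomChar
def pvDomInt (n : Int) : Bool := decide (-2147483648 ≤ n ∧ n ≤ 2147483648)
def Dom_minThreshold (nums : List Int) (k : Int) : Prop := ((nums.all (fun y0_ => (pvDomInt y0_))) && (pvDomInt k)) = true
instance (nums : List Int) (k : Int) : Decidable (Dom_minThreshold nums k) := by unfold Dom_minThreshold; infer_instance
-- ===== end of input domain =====

-- B replaces A's Fenwick tree over compressed coordinates by a plain sorted list of the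
-- already-seen values queried with bisect; same binary search, same return value (simpler, not faster).

-- ===== PORT A =====
-- 'i & -i' of the Fenwick loops (Python-exact bitwise and)
def fwLowbit (i : Int) : Int := PySem.Int.band i (-i)

-- 'while i <= n: bit[i] += delta; i += i & -i' (fuel bounds the iteration count; n+1 steps always suffice since i starts ≥ 1 and grows)
def fwUpdateLoop (n : Int) (bit : List Int) (i : Int) (delta : Int) : Nat → List Int
  | 0 => bit
  | fuel+1 =>
    if i ≤ n then
      fwUpdateLoop n (PySem.List.pySetD bit i (PySem.List.pyGetD bit i 0 + delta)) (i + fwLowbit i) delta fuel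
    else bit

def fwUpdate (n : Int) (bit : List Int) (idx delta : Int) : List Int :=
  fwUpdateLoop n bit (idx + 1) delta (n.toNat + 1)

-- 'while i > 0: s += bit[i]; i -= i & -i'
def fwQueryLoop (bit : List Int) (i : Int) (s : Int) : Nat → Int
  | 0 => s
  | fuel+1 =>
    if 0 < i then fwQueryLoop bit (i - fwLowbit i) (s + PySem.List.pyGetD bit i 0) fuel
    else s

def fwQuery (n : Int) (bit : List Int) (idx : Int) : Int :=
  if idx < 0 then 0 else fwQueryLoop bit (idx + 1) 0 (n.toNat + 2)

def fwRangeQuery (n : Int) (bit : List Int) (l r : Int) : Int :=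
  if l > r then 0 else fwQuery n bit r - fwQuery n bit (l - 1)

-- the 'for num in nums' loop of check(th)
def checkALoop (vals : List Int) (k th m : Int) : List Int → List Int → Int → Bool
  | [], _, cnt => decide (cnt ≥ k)
  | num :: rest, bit, cnt =>
    let idxL : Int := (PySem.List.bisectRight vals num : Nat)
    let idxR : Int := ((PySem.List.bisectRight vals (num + th) : Nat) : Int) - 1
    if idxL ≤ idxR then
      let cnt' := cnt + fwRangeQuery m bit idxL idxR
      if cnt' ≥ k then true
      else checkALoop vals k th m rest (fwUpdate m bit ((PySem.List.bisectLeft vals num : Nat) : Int) 1) cnt'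
    else
      checkALoop vals k th m rest (fwUpdate m bit ((PySem.List.bisectLeft vals num : Nat) : Int) 1) cnt

def checkA (nums : List Int) (k th : Int) : Bool :=
  let vals := PySem.List.sorted (PySem.Set.ofList nums) (fun x => x) false
  checkALoop vals k th (vals.length : Int) nums (List.replicate (vals.length + 1) 0) 0

-- 'while lo <= hi' binary search (fuel = hi-lo+1 iterations always suffice)
def bsLoopA (nums : List Int) (k : Int) (lo hi ans : Int) : Nat → Int
  | 0 => ans
  | fuel+1 =>
    if lo ≤ hi then
      let mid := PySem.Int.floordiv (lo + hi) 2
      if checkA nums k mid then bsLoopA nums k lo (mid - 1) mid fuel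
      else bsLoopA nums k (mid + 1) hi ans fuel
    else ans

def minThreshold (nums : List Int) (k : Int) : Int :=
  match nums with
  | [] => -1
  | x :: t =>
    let hi := (t.foldl max x) - (t.foldl min x)   -- max(nums) - min(nums)
    bsLoopA (x :: t) k 0 hi (-1) (hi.toNat + 1)

-- ===== PORT B =====
def checkBLoop (k th : Int) : List Int → List Int → Int → Bool
  | [], _, cnt => decide (cnt ≥ k)
  | num :: rest, seen, cnt =>
    let cnt' := cnt + (((PySem.List.bisectRight seen (num + th) : Nat) : Int) - ((PySem.List.bisectRight seen num : Nat) : Int))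
    if cnt' ≥ k then true
    else checkBLoop k th rest (PySem.List.insert seen ((PySem.List.bisectRight seen num : Nat) : Int) num) cnt'

def checkB (nums : List Int) (k th : Int) : Bool := checkBLoop k th nums [] 0

def bsLoopB (nums : List Int) (k : Int) (lo hi ans : Int) : Nat → Int
  | 0 => ans
  | fuel+1 =>
    if lo ≤ hi then
      let mid := PySem.Int.floordiv (lo + hi) 2
      if checkB nums k mid then bsLoopB nums k lo (mid - 1) mid fuel
      else bsLoopB nums k (mid + 1) hi ans fuel
    else ans

def minThreshold_alt (nums : List Int) (k : Int) : Int :=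
  match nums with
  | [] => -1
  | x :: t =>
    let hi := (t.foldl max x) - (t.foldl min x)
    bsLoopB (x :: t) k 0 hi (-1) (hi.toNat + 1)

-- ===== PRECONDITION & SPEC =====
def Spec_minThreshold (nums : List Int) (k : Int) (out : Int) : Prop := out = minThreshold_alt nums k
instance (nums : List Int) (k : Int) (out : Int) : Decidable (Spec_minThreshold nums k out) := by unfold Spec_minThreshold; infer_instance

-- ===== CLAIM (what is proved, stated in full; the proofs are below) =====
def Claim_equal_minThreshold : Prop := ∀ (nums : List Int) (k : Int), Dom_minThreshold nums k → Spec_minThreshold nums k (minThreshold nums k)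

-- ===== LEMMAS AND PROOFS =====
def lbN : Nat → Nat
  | 0 => 0
  | n+1 => if (n+1) % 2 = 1 then 1 else 2 * lbN ((n+1)/2)
decreasing_by omega

theorem lbN_odd {n : Nat} (h : n % 2 = 1) : lbN n = 1 := by
  match n, h with
  | m+1, h => simp [lbN, h]

theorem lbN_even {n : Nat} (h : n % 2 = 0) (h0 : 0 < n) : lbN n = 2 * lbN (n / 2) := by
  match n, h0 with
  | m+1, _ => simp [lbN]; omega

theorem lbN_pos {n : Nat} (h : 0 < n) : 0 < lbN n := by
  induction n using Nat.strong_induction_on with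
  | _ n ih =>
    rcases Nat.even_or_odd n with he | ho
    · have he' := Nat.even_iff.mp he
      rw [lbN_even he' h]
      have := ih (n/2) (by omega) (by omega)
      omega
    · rw [lbN_odd (Nat.odd_iff.mp ho)]; omega

theorem lbN_le {n : Nat} (h : 0 < n) : lbN n ≤ n := by
  induction n using Nat.strong_induction_on with
  | _ n ih =>
    rcases Nat.even_or_odd n with he | ho
    · have he' := Nat.even_iff.mp he
      rw [lbN_even he' h]
      have := ih (n/2) (by omega) (by omega)
      omega
    · rw [lbN_odd (Nat.odd_iff.mp ho)]; omega

theorem lbN_pow2_dvd_iff {n : Nat} (h : 0 < n) (t : Nat) : 2^t ∣ n ↔ 2^t ∣ lbN n := by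
  induction n using Nat.strong_induction_on generalizing t with
  | _ n ih =>
    rcases Nat.even_or_odd n with he | ho
    · have he' := Nat.even_iff.mp he
      rw [lbN_even he' h]
      match t with
      | 0 => simp
      | t+1 =>
        have h2 : 0 < n / 2 := by omega
        have hiff := ih (n/2) (by omega) h2 t
        have hn : n = 2 * (n/2) := by omega
        rw [pow_succ, mul_comm (2^t) 2]
        constructor
        · intro hd
          rw [hn] at hd
          exact Nat.mul_dvd_mul_left 2 (hiff.mp ((Nat.mul_dvd_mul_iff_left (by norm_num : 0 < 2)).mp hd))
        · intro hd
          rw [hn]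
          exact Nat.mul_dvd_mul_left 2 (hiff.mpr ((Nat.mul_dvd_mul_iff_left (by norm_num : 0 < 2)).mp hd))
    · have ho' := Nat.odd_iff.mp ho
      rw [lbN_odd ho']
      match t with
      | 0 => simp
      | t+1 =>
        constructor
        · intro hd
          have h2 : 2 ∣ n := dvd_trans ⟨2^t, by ring⟩ hd
          omega
        · intro hd
          have h1 := Nat.le_of_dvd (by norm_num) hd
          have h2 : 2 ≤ 2^(t+1) := by
            calc 2 = 2^1 := by norm_num
            _ ≤ 2^(t+1) := Nat.pow_le_pow_right (by norm_num) (by omega)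
          omega

theorem lbN_pow {n : Nat} (h : 0 < n) : ∃ K, lbN n = 2^K := by
  induction n using Nat.strong_induction_on with
  | _ n ih =>
    rcases Nat.even_or_odd n with he | ho
    · have he' := Nat.even_iff.mp he
      rw [lbN_even he' h]
      obtain ⟨K, hK⟩ := ih (n/2) (by omega) (by omega)
      exact ⟨K+1, by rw [hK]; ring⟩
    · exact ⟨0, by rw [lbN_odd (Nat.odd_iff.mp ho), pow_zero]⟩

theorem lbN_sub {K : Nat} : ∀ {a r : Nat}, 2^K ∣ a → 0 < r → r < 2^K → r < a → lbN (a - r) = lbN r := by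
  induction K with
  | zero => intro a r _ h1 h2 _; omega
  | succ K ih =>
    intro a r ha h1 h2 h3
    obtain ⟨c, hc⟩ := ha
    have hc' : a = 2 * (2^K * c) := by rw [hc, pow_succ]; ring
    have ha2 : a % 2 = 0 := by omega
    rcases Nat.even_or_odd r with hre | hro
    · have hre' := Nat.even_iff.mp hre
      have hsub2 : (a - r) % 2 = 0 := by omega
      rw [lbN_even hre' h1, lbN_even hsub2 (by omega)]
      have harg : (a - r) / 2 = a/2 - r/2 := by omega
      have hdiv : a / 2 = 2^K * c := by omega
      have hK2 : (2:Nat)^(K+1) = 2 * 2^K := by ring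
      rw [harg]
      congr 1
      exact ih (a := a/2) (r := r/2) (by rw [hdiv]; exact ⟨c, rfl⟩) (by omega) (by omega) (by omega)
    · have hro' := Nat.odd_iff.mp hro
      have hsub : (a - r) % 2 = 1 := by omega
      rw [lbN_odd hsub, lbN_odd hro']

theorem lbN_core {p i : Nat} (hp : 0 < p) (h1 : i - lbN i < p) (h2 : p < i) : p + lbN p ≤ i := by
  obtain ⟨K, hK⟩ := lbN_pow (n := i) (by omega)
  have hle := lbN_le (n := i) (by omega)
  have hdvd : 2^K ∣ i := (lbN_pow2_dvd_iff (n := i) (by omega) K).mpr (by rw [hK])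
  have hlp : lbN p = lbN (i - p) := by
    conv_lhs => rw [show p = i - (i - p) from by omega]
    exact lbN_sub hdvd (by omega) (by rw [← hK]; omega) (by omega)
  have := lbN_le (n := i - p) (by omega)
  omega

theorem lbN_step_iff {p i : Nat} (hp : 0 < p) (hi : 0 < i) (hne : p ≠ i) :
    (i - lbN i < p + lbN p ∧ p + lbN p ≤ i) ↔ (i - lbN i < p ∧ p ≤ i) := by
  have hpp := lbN_pos hp
  have hip := lbN_pos hi
  have hil := lbN_le hi
  constructor
  · rintro ⟨ha, hb⟩
    refine ⟨?_, by omega⟩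
    by_contra hc0
    have hc : p ≤ i - lbN i := by omega
    obtain ⟨K, hK⟩ := lbN_pow hi
    obtain ⟨k, hk⟩ := lbN_pow hp
    have hdvd_i : 2^K ∣ i := (lbN_pow2_dvd_iff hi K).mpr (by rw [hK])
    have hnd : ¬ 2^(K+1) ∣ i := by
      intro hd
      have h5 := (lbN_pow2_dvd_iff hi (K+1)).mp hd
      rw [hK] at h5
      have h6 := Nat.le_of_dvd (by positivity) h5
      have h7 : (2:Nat)^K < 2^(K+1) := Nat.pow_lt_pow_right (by norm_num) (by omega)
      omega
    obtain ⟨m, hm⟩ := hdvd_i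
    have hmodd : m % 2 = 1 := by
      rcases Nat.even_or_odd m with hme | hmo
      · exfalso; apply hnd
        obtain ⟨u, hu⟩ := hme
        exact ⟨u, by rw [hm, hu, pow_succ]; ring⟩
      · exact Nat.odd_iff.mp hmo
    have hdvd_p : 2^k ∣ p := (lbN_pow2_dvd_iff hp k).mpr (by rw [hk])
    rw [hK] at ha hc hil
    rw [hk] at ha hb
    rcases Nat.lt_or_ge k (K+1) with hkK | hKk
    · have hkK : k ≤ K := by omega
      have hdvd_iK : 2^k ∣ i - 2^K := by
        have h1 : (2:Nat)^k ∣ 2^K := pow_dvd_pow 2 hkK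
        exact Nat.dvd_sub (dvd_trans h1 ⟨m, hm⟩) h1
      have hd : 2^k ∣ i - 2^K - p := Nat.dvd_sub hdvd_iK hdvd_p
      have hlt : i - 2^K - p < 2^k := by omega
      have hz : i - 2^K - p = 0 := by
        rcases Nat.eq_zero_or_pos (i - 2^K - p) with h0 | h0
        · exact h0
        · have := Nat.le_of_dvd h0 hd; omega
      have hpeq : p = i - 2^K := by omega
      have hdvd2 : 2^(K+1) ∣ p := by
        obtain ⟨u, hu⟩ : ∃ u, m - 1 = 2*u := ⟨(m-1)/2, by omega⟩
        refine ⟨u, ?_⟩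
        rw [hpeq, hm]
        calc 2^K * m - 2^K = 2^K * (m - 1) := by rw [Nat.mul_sub, Nat.mul_one]
        _ = 2^K * (2*u) := by rw [hu]
        _ = 2^(K+1) * u := by rw [pow_succ]; ring
      have h9 := (lbN_pow2_dvd_iff hp (K+1)).mp hdvd2
      rw [hk] at h9
      have h10 := Nat.le_of_dvd (by positivity) h9
      have h11 : (2:Nat)^k < 2^(K+1) := Nat.pow_lt_pow_right (by norm_num) (by omega)
      omega
    · have hdvd2k : 2^(K+1) ∣ 2^k := pow_dvd_pow 2 (by omega)
      have hdvd_p2 : 2^(K+1) ∣ p := dvd_trans hdvd2k hdvd_p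
      have hdvd_p' : 2^(K+1) ∣ p + 2^k := Nat.dvd_add hdvd_p2 hdvd2k
      obtain ⟨t, ht⟩ := hdvd_p'
      obtain ⟨u, hu⟩ : ∃ u, m = 2*u+1 := ⟨m/2, by omega⟩
      have hieq : i = 2^(K+1) * u + 2^K := by rw [hm, hu, pow_succ]; ring
      have hb' : 2^(K+1) * t ≤ 2^(K+1) * u + 2^K := by omega
      have ha' : 2^(K+1) * u < 2^(K+1) * t := by omega
      have hut : u < t := Nat.lt_of_mul_lt_mul_left ha'
      have htu : t < u + 1 := by
        have h12 : 2^(K+1) * t < 2^(K+1) * (u+1) := by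
          have h13 : (2:Nat)^(K+1) = 2 * 2^K := by ring
          have h14 : 2^(K+1) * (u+1) = 2^(K+1) * u + 2^(K+1) := by ring
          omega
        exact Nat.lt_of_mul_lt_mul_left h12
      omega
  · rintro ⟨ha, hb⟩
    have hlt : p < i := by omega
    exact ⟨by omega, lbN_core hp ha hlt⟩

theorem landN_self (a : Nat) : a &&& a = a := by
  apply Nat.eq_of_testBit_eq
  intro j
  rw [Nat.testBit_land]
  exact Bool.and_self _

theorem landN_even_odd (a b : Nat) : (2*a) &&& (2*b+1) = 2*(a &&& b) := by
  have := @Nat.bitwise_bit Bool.and (by decide) false a true b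
  simpa [Nat.bit, Nat.land, two_mul, mul_comm] using this

theorem landN_odd_even (a b : Nat) : (2*a+1) &&& (2*b) = 2*(a &&& b) := by
  have := @Nat.bitwise_bit Bool.and (by decide) true a false b
  simpa [Nat.bit, Nat.land, two_mul, mul_comm] using this

theorem land_pred {m : Nat} (h : 0 < m) : m &&& (m-1) = m - lbN m := by
  induction m using Nat.strong_induction_on with
  | _ m ih =>
    rcases Nat.even_or_odd m with he | ho
    · have he' := Nat.even_iff.mp he
      obtain ⟨a, ha⟩ : ∃ a, m = 2*a := ⟨m/2, by omega⟩
      have ha0 : 0 < a := by omega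
      have hm1 : m - 1 = 2*(a-1)+1 := by omega
      rw [lbN_even he' h]
      have hdiv : m / 2 = a := by omega
      rw [hdiv]
      rw [hm1, ha, landN_even_odd]
      have := ih a (by omega) ha0
      have hle := lbN_le ha0
      omega
    · have ho' := Nat.odd_iff.mp ho
      obtain ⟨a, ha⟩ : ∃ a, m = 2*a+1 := ⟨m/2, by omega⟩
      have hm1 : m - 1 = 2*a := by omega
      rw [lbN_odd ho', hm1, ha, landN_odd_even, landN_self]

-- bridge: Python's 'i & -i' for i ≥ 1 is the lowbit
theorem band_neg_eq_lbN {i : Int} (h : 1 ≤ i) : PySem.Int.band i (-i) = (lbN i.toNat : Int) := by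
  have h1 : (0:Int) ≤ i := by omega
  have h2 : ¬ (0:Int) ≤ -i := by omega
  rw [PySem.Int.band, if_pos h1, if_neg h2]
  have h3 : (-(-i) - 1).toNat = i.toNat - 1 := by omega
  rw [h3, land_pred (by omega)]
  have := lbN_le (n := i.toNat) (by omega)
  omega

-- ===== Fenwick abstract model (Nat-indexed) =====
def fwQN (bit : List Int) : Nat → Int
  | 0 => 0
  | (q+1) => bit.getD (q+1) 0 + fwQN bit ((q+1) - lbN (q+1))
decreasing_by have := lbN_pos (n := q+1) (by omega); omega

def fwUN (n : Nat) (bit : List Int) (p : Nat) : List Int :=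
  if h : 0 < p ∧ p ≤ n then fwUN n (bit.set p (bit.getD p 0 + 1)) (p + lbN p) else bit
termination_by n + 1 - p
decreasing_by have := lbN_pos h.1; omega

theorem fwUN_length (n : Nat) : ∀ (fuel p : Nat) (bit : List Int), n + 1 - p ≤ fuel →
    (fwUN n bit p).length = bit.length := by
  intro fuel
  induction fuel with
  | zero => intro p bit h; rw [fwUN, dif_neg (by omega)]
  | succ fuel ih =>
    intro p bit h
    rw [fwUN]
    by_cases hc : 0 < p ∧ p ≤ n
    · rw [dif_pos hc]
      have hpos := lbN_pos hc.1
      rw [ih (p + lbN p) _ (by omega)]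
      exact List.length_set ..
    · rw [dif_neg hc]

theorem getD_set_self {bit : List Int} {p : Nat} (h : p < bit.length) (v : Int) :
    (bit.set p v).getD p 0 = v := by
  rw [List.getD_eq_getElem?_getD, List.getElem?_set_self (by omega)]
  simp

theorem getD_set_ne {bit : List Int} {p i : Nat} (h : i ≠ p) (v : Int) :
    (bit.set p v).getD i 0 = bit.getD i 0 := by
  rw [List.getD_eq_getElem?_getD, List.getElem?_set_ne (by omega), ← List.getD_eq_getElem?_getD]

theorem fwUN_getD (n : Nat) : ∀ (fuel p : Nat) (bit : List Int), 0 < p → n + 1 - p ≤ fuel →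
    bit.length = n + 1 → ∀ i, 0 < i → i ≤ n →
    (fwUN n bit p).getD i 0 = bit.getD i 0 + (if i - lbN i < p ∧ p ≤ i then 1 else 0) := by
  intro fuel
  induction fuel with
  | zero =>
    intro p bit hp hfuel hlen i hi hin
    rw [fwUN, dif_neg (by omega), if_neg (by omega)]
    omega
  | succ fuel ih =>
    intro p bit hp hfuel hlen i hi hin
    rw [fwUN]
    by_cases hc : 0 < p ∧ p ≤ n
    · rw [dif_pos hc]
      have hpos := lbN_pos hc.1
      have hset : (bit.set p (bit.getD p 0 + 1)).length = n + 1 := by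
        rw [List.length_set]; exact hlen
      rw [ih (p + lbN p) _ (by omega) (by omega) hset i hi hin]
      by_cases hip : i = p
      · subst hip
        rw [getD_set_self (by omega)]
        rw [if_neg (by have := lbN_pos hp; omega)]
        rw [if_pos (by have := lbN_pos hp; omega)]
        omega
      · rw [getD_set_ne hip]
        congr 1
        rw [if_congr (lbN_step_iff hp hi (fun hpe => hip hpe.symm)) rfl rfl]
    · rw [dif_neg hc, if_neg (by omega)]
      omega

-- counting split
theorem countP_split {α : Type} (l : List α) (P Q R : α → Bool)
    (h1 : ∀ x ∈ l, P x = (Q x || R x)) (h2 : ∀ x ∈ l, ¬(Q x = true ∧ R x = true)) :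
    l.countP P = l.countP Q + l.countP R := by
  induction l with
  | nil => simp
  | cons a l ih =>
    have hP := h1 a (by simp)
    have hQR := h2 a (by simp)
    rw [List.countP_cons, List.countP_cons, List.countP_cons,
      ih (fun x hx => h1 x (by simp [hx])) (fun x hx => h2 x (by simp [hx]))]
    rcases hq : Q a <;> rcases hr : R a <;> simp [hq, hr] at hP hQR ⊢ <;> simp [hP] <;> omega

def fwInv (n : Nat) (bit : List Int) (S : List Nat) : Prop :=
  bit.length = n + 1 ∧
  ∀ i, 0 < i → i ≤ n → bit.getD i 0 = (S.countP (fun p => decide (i - lbN i < p ∧ p ≤ i)) : Int)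

theorem fwInv_init (n : Nat) : fwInv n (List.replicate (n+1) 0) [] := by
  refine ⟨by simp, ?_⟩
  intro i _ hin
  rw [List.getD_eq_getElem?_getD, List.getElem?_replicate]
  simp [hin]

theorem fwInv_update {n : Nat} {bit : List Int} {S : List Nat} {p : Nat}
    (h : fwInv n bit S) (hp : 0 < p) : fwInv n (fwUN n bit p) (p :: S) := by
  obtain ⟨hlen, hInv⟩ := h
  refine ⟨by rw [fwUN_length n (n+1-p) p bit le_rfl]; exact hlen, ?_⟩
  intro i hi hin
  rw [fwUN_getD n (n+1-p) p bit hp le_rfl hlen i hi hin, hInv i hi hin, List.countP_cons]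
  by_cases hiv : i - lbN i < p ∧ p ≤ i
  · rw [if_pos hiv]; simp [hiv]
  · rw [if_neg hiv]
    have : (fun p => decide (i - lbN i < p ∧ p ≤ i)) p = false := by
      simp only [decide_eq_false_iff_not]; exact hiv
    simp [this]

theorem fwQN_count {n : Nat} {bit : List Int} {S : List Nat}
    (h : fwInv n bit S) (hS : ∀ p ∈ S, 0 < p) :
    ∀ q, q ≤ n → fwQN bit q = (S.countP (fun p => decide (p ≤ q)) : Int) := by
  intro q
  induction q using Nat.strong_induction_on with
  | _ q ih =>
    intro hq
    match q with
    | 0 =>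
      rw [fwQN]
      rw [List.countP_eq_zero.mpr (by intro p hp; simpa using by have := hS p hp; omega)]
      simp
    | q+1 =>
      have hpos := lbN_pos (n := q+1) (by omega)
      have hle := lbN_le (n := q+1) (by omega)
      rw [fwQN, h.2 (q+1) (by omega) hq, ih ((q+1) - lbN (q+1)) (by omega) (by omega)]
      rw [countP_split S (fun p => decide (p ≤ q+1))
        (fun p => decide ((q+1) - lbN (q+1) < p ∧ p ≤ q+1))
        (fun p => decide (p ≤ (q+1) - lbN (q+1)))
        (by intro x hx
            show decide (x ≤ q+1) = (decide ((q+1) - lbN (q+1) < x ∧ x ≤ q+1) || decide (x ≤ (q+1) - lbN (q+1)))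
            rw [← Bool.decide_or, decide_eq_decide]
            have h1 : 0 < lbN (q+1) := hpos
            have h2 : lbN (q+1) ≤ q+1 := hle
            omega)
        (by intro x hx
            rintro ⟨h3, h4⟩
            have h5 := of_decide_eq_true h3
            have h6 := of_decide_eq_true h4
            omega)]
      push_cast
      ring

-- countP characterized by an index cut
theorem countP_eq_of_cut (xs : List Int) (p : Int → Bool) (c : Nat) (hc : c ≤ xs.length)
    (h1 : ∀ j (hj : j < xs.length), j < c → p xs[j] = true)
    (h2 : ∀ j (hj : j < xs.length), c ≤ j → p xs[j] = false) : xs.countP p = c := by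
  induction xs generalizing c with
  | nil => simp at hc ⊢; omega
  | cons x t ih =>
    match c with
    | 0 =>
      rw [List.countP_eq_zero.mpr]
      intro a ha
      obtain ⟨j, hj, rfl⟩ := List.mem_iff_getElem.mp ha
      simp [h2 j hj (by omega)]
    | c+1 =>
      rw [List.countP_cons, ih c (by simpa using hc)
        (fun j hj hjc => h1 (j+1) (by simpa using hj) (by omega))
        (fun j hj hjc => h2 (j+1) (by simpa using hj) (by omega))]
      have := h1 0 (by simp) (by omega)
      simp at this
      simp [this]

theorem bisectRight_eq_countP {xs : List Int} (hs : List.Pairwise (· ≤ ·) xs) (y : Int) :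
    PySem.List.bisectRight xs y = xs.countP (fun v => decide (v ≤ y)) := by
  obtain ⟨hc, h1, h2⟩ := PySem.List.bisectRight_spec xs y hs
  exact (countP_eq_of_cut xs _ _ hc
    (fun j hj hjc => by simpa using h1 j hj hjc)
    (fun j hj hjc => by simpa using by have := h2 j hj hjc; omega)).symm

theorem bisectLeft_eq_countP {xs : List Int} (hs : List.Pairwise (· ≤ ·) xs) (y : Int) :
    PySem.List.bisectLeft xs y = xs.countP (fun v => decide (v < y)) := by
  obtain ⟨hc, h1, h2⟩ := PySem.List.bisectLeft_spec xs y hs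
  exact (countP_eq_of_cut xs _ _ hc
    (fun j hj hjc => by simpa using h1 j hj hjc)
    (fun j hj hjc => by simpa using by have := h2 j hj hjc; omega)).symm

-- strict count comparison via a witness
theorem countP_lt_of_witness {l : List Int} {p q : Int → Bool} (a : Int) (ha : a ∈ l)
    (hpa : p a = false) (hqa : q a = true) (himp : ∀ b ∈ l, p b = true → q b = true) :
    l.countP p < l.countP q := by
  obtain ⟨s, t, rfl⟩ := List.append_of_mem ha
  rw [List.countP_append, List.countP_append, List.countP_cons, List.countP_cons, hpa, hqa]
  have hs := List.countP_mono_left (l := s) (p := p) (q := q)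
    (fun b hb => himp b (by simp [hb]))
  have ht := List.countP_mono_left (l := t) (p := p) (q := q)
    (fun b hb => himp b (by simp [hb]))
  simp only [Bool.false_eq_true, if_false, if_true]
  omega

-- x ∈ vals → (bisectLeft vals x < bisectRight vals y ↔ x ≤ y)
theorem bl_lt_br_iff {vals : List Int} (hs : List.Pairwise (· ≤ ·) vals) {x y : Int}
    (hx : x ∈ vals) :
    (PySem.List.bisectLeft vals x < PySem.List.bisectRight vals y ↔ x ≤ y) := by
  rw [bisectLeft_eq_countP hs, bisectRight_eq_countP hs]
  constructor
  · intro h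
    by_contra hc
    have hyx : y < x := by omega
    have := List.countP_mono_left (l := vals)
      (p := fun v => decide (v ≤ y)) (q := fun v => decide (v < x))
      (fun b _ hb => by simpa using by have := of_decide_eq_true hb; omega)
    omega
  · intro h
    exact countP_lt_of_witness x hx (by simp) (by simpa using h)
      (fun b _ hb => by simpa using by have := of_decide_eq_true hb; omega)

-- ===== port ↔ model correspondence =====
theorem fwUpdateLoop_eq (n : Nat) : ∀ (fuel : Nat) (bit : List Int) (p : Nat), 0 < p →
    n + 1 - p ≤ fuel → fwUpdateLoop (n : Int) bit (p : Int) 1 fuel = fwUN n bit p := by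
  intro fuel
  induction fuel with
  | zero =>
    intro bit p hp hf
    rw [fwUN, dif_neg (by omega)]
    rfl
  | succ fuel ih =>
    intro bit p hp hf
    rw [fwUN]
    by_cases hc : p ≤ n
    · rw [dif_pos ⟨hp, hc⟩]
      have hpos := lbN_pos hp
      simp only [fwUpdateLoop]
      rw [if_pos (by exact_mod_cast hc)]
      have hlow : fwLowbit (p : Int) = (lbN p : Int) := by
        rw [fwLowbit, band_neg_eq_lbN (by exact_mod_cast hp)]
        simp
      rw [hlow]
      have hstep : (p : Int) + (lbN p : Int) = ((p + lbN p : Nat) : Int) := by push_cast; ring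
      rw [hstep]
      rw [PySem.List.pySetD_natCast, PySem.List.pyGetD_natCast]
      exact ih (bit.set p (bit.getD p 0 + 1)) (p + lbN p) (by omega) (by omega)
    · rw [dif_neg (by omega)]
      simp only [fwUpdateLoop]
      rw [if_neg (by exact_mod_cast hc)]

theorem fwQueryLoop_eq : ∀ (fuel : Nat) (bit : List Int) (q : Nat) (s : Int), q ≤ fuel →
    fwQueryLoop bit (q : Int) s fuel = s + fwQN bit q := by
  intro fuel
  induction fuel with
  | zero =>
    intro bit q s hq
    have : q = 0 := by omega
    subst this
    rw [fwQN]
    simp [fwQueryLoop]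
  | succ fuel ih =>
    intro bit q s hq
    match q with
    | 0 =>
      rw [fwQN]
      simp [fwQueryLoop]
    | q+1 =>
      have hpos := lbN_pos (n := q+1) (by omega)
      have hle := lbN_le (n := q+1) (by omega)
      simp only [fwQueryLoop]
      rw [if_pos (by exact_mod_cast Nat.succ_pos q)]
      have hlow : fwLowbit ((q+1 : Nat) : Int) = (lbN (q+1) : Int) := by
        rw [fwLowbit, band_neg_eq_lbN (by exact_mod_cast Nat.succ_pos q)]
        simp
      rw [hlow]
      have hstep : ((q+1 : Nat) : Int) - (lbN (q+1) : Int) = (((q+1) - lbN (q+1) : Nat) : Int) := by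
        push_cast [hle]; ring
      rw [hstep, PySem.List.pyGetD_natCast]
      rw [ih bit ((q+1) - lbN (q+1)) _ (by omega)]
      rw [fwQN]
      ring

theorem fwUpdate_eq (n : Nat) (bit : List Int) (q : Nat) :
    fwUpdate (n : Int) bit (q : Int) 1 = fwUN n bit (q+1) := by
  unfold fwUpdate
  have h1 : ((n : Int)).toNat = n := by simp
  have h2 : (q : Int) + 1 = ((q+1 : Nat) : Int) := by push_cast; ring
  rw [h1, h2]
  exact fwUpdateLoop_eq n (n+1) bit (q+1) (by omega) (by omega)

theorem fwQuery_eq (n : Nat) (bit : List Int) (q : Nat) (hq : q ≤ n + 1) :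
    fwQuery (n : Int) bit ((q : Int) - 1) = fwQN bit q := by
  unfold fwQuery
  match q with
  | 0 =>
    rw [if_pos (by norm_num)]
    rw [fwQN]
  | q+1 =>
    rw [if_neg (by push_cast; omega)]
    have h1 : ((q+1 : Nat) : Int) - 1 + 1 = ((q+1 : Nat) : Int) := by ring
    have h2 : ((n : Int)).toNat = n := by simp
    rw [h1, h2]
    exact fwQueryLoop_eq (n+2) bit (q+1) 0 (by omega) |>.trans (by ring)

-- ===== insort: sortedness and permutation =====
theorem insort_sorted_perm {seen : List Int} (hs : List.Pairwise (· ≤ ·) seen) (num : Int) :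
    (PySem.List.insert seen ((PySem.List.bisectRight seen num : Nat) : Int) num).Pairwise (· ≤ ·) ∧
    (PySem.List.insert seen ((PySem.List.bisectRight seen num : Nat) : Int) num).Perm (num :: seen) := by
  obtain ⟨hc, h1, h2⟩ := PySem.List.bisectRight_spec seen num hs
  rw [PySem.List.insert_natCast seen _ num hc]
  constructor
  · rw [List.pairwise_append]
    refine ⟨List.Pairwise.sublist (List.take_sublist _ seen) hs, ?_, ?_⟩
    · rw [List.pairwise_cons]
      refine ⟨?_, List.Pairwise.sublist (List.drop_sublist _ seen) hs⟩
      intro b hb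
      rw [List.mem_drop_iff_getElem] at hb
      obtain ⟨i, hi, rfl⟩ := hb
      have := h2 (PySem.List.bisectRight seen num + i) (by omega) (by omega)
      omega
    · intro a ha b hb
      rw [List.mem_take_iff_getElem] at ha
      obtain ⟨j, hj, rfl⟩ := ha
      have hjlen : j < seen.length := by omega
      have hjc : j < PySem.List.bisectRight seen num := by omega
      rcases List.mem_cons.mp hb with rfl | hbd
      · simpa [List.getElem_take] using h1 j hjlen hjc
      · rw [List.mem_drop_iff_getElem] at hbd
        obtain ⟨i, hi, rfl⟩ := hbd
        have := List.pairwise_iff_getElem.mp hs j (PySem.List.bisectRight seen num + i)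
          hjlen (by omega) (by omega)
        simpa [List.getElem_take] using this
  · exact List.perm_middle.trans (List.Perm.of_eq (by rw [List.take_append_drop]))

-- ===== counting facts about the check step =====
theorem no_mid {vals : List Int} (hs : List.Pairwise (· ≤ ·) vals) {num th : Int} (hth : 0 ≤ th)
    (hba : PySem.List.bisectRight vals (num + th) ≤ PySem.List.bisectRight vals num) :
    ∀ x ∈ vals, (decide (x ≤ num + th)) = (decide (x ≤ num)) := by
  rw [bisectRight_eq_countP hs, bisectRight_eq_countP hs] at hba
  have hsplit := countP_split vals (fun v => decide (v ≤ num + th)) (fun v => decide (v ≤ num))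
    (fun v => decide (num < v ∧ v ≤ num + th))
    (fun x _ => by
      show decide (x ≤ num + th) = (decide (x ≤ num) || decide (num < x ∧ x ≤ num + th))
      rw [← Bool.decide_or, decide_eq_decide]
      omega)
    (fun x _ => by
      rintro ⟨h3, h4⟩
      have h5 := of_decide_eq_true h3
      have h6 := of_decide_eq_true h4
      omega)
  have hzero : vals.countP (fun v => decide (num < v ∧ v ≤ num + th)) = 0 := by omega
  intro x hx
  have hmid := List.countP_eq_zero.mp hzero x hx
  have hmid' : ¬(num < x ∧ x ≤ num + th) := fun hc => hmid (decide_eq_true hc)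
  rw [decide_eq_decide]
  omega

theorem A_query {vals : List Int} (hs : List.Pairwise (· ≤ ·) vals) (bit : List Int)
    (prefixL : List Int) (hsub : ∀ x ∈ prefixL, x ∈ vals)
    (hInv : fwInv vals.length bit (prefixL.map (fun x => PySem.List.bisectLeft vals x + 1)))
    (y : Int) :
    fwQuery (vals.length : Int) bit (((PySem.List.bisectRight vals y : Nat) : Int) - 1)
      = (prefixL.countP (fun v => decide (v ≤ y)) : Int) := by
  have hble := (PySem.List.bisectRight_spec vals y hs).1
  rw [fwQuery_eq vals.length bit _ (by omega)]
  rw [fwQN_count hInv (by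
    intro p hp
    rw [List.mem_map] at hp
    obtain ⟨x, _, rfl⟩ := hp
    omega) _ hble]
  rw [List.countP_map]
  congr 1
  apply List.countP_congr
  intro x hx
  simp only [Function.comp]
  rw [decide_eq_true_iff, decide_eq_true_iff]
  have := bl_lt_br_iff hs (hsub x hx) (y := y)
  omega

theorem step_inv {vals : List Int} {bit : List Int} {prefixL : List Int} {num : Int}
    (hInv : fwInv vals.length bit (prefixL.map (fun x => PySem.List.bisectLeft vals x + 1))) :
    fwInv vals.length (fwUpdate (vals.length : Int) bit ((PySem.List.bisectLeft vals num : Nat) : Int) 1)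
      ((num :: prefixL).map (fun x => PySem.List.bisectLeft vals x + 1)) := by
  rw [fwUpdate_eq vals.length bit (PySem.List.bisectLeft vals num)]
  have := fwInv_update hInv (p := PySem.List.bisectLeft vals num + 1) (by omega)
  simpa [List.map_cons] using this

theorem count_mono {prefixL : List Int} {num th : Int} (hth : 0 ≤ th) :
    prefixL.countP (fun v => decide (v ≤ num)) ≤ prefixL.countP (fun v => decide (v ≤ num + th)) :=
  List.countP_mono_left (fun b _ hbb => by
    rw [decide_eq_true_iff] at hbb ⊢
    omega)

-- A's check loop returns true as soon as cnt ≥ k (cnt never decreases)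
theorem checkALoop_true {vals : List Int} (hs : List.Pairwise (· ≤ ·) vals) {k th : Int}
    (hth : 0 ≤ th) :
    ∀ (rest prefixL bit : List Int) (cnt : Int),
    (∀ x ∈ rest, x ∈ vals) → (∀ x ∈ prefixL, x ∈ vals) →
    fwInv vals.length bit (prefixL.map (fun x => PySem.List.bisectLeft vals x + 1)) →
    k ≤ cnt →
    checkALoop vals k th (vals.length : Int) rest bit cnt = true := by
  intro rest
  induction rest with
  | nil =>
    intro prefixL bit cnt _ _ _ hk
    simp only [checkALoop]
    exact decide_eq_true (by omega)
  | cons num rest ih =>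
    intro prefixL bit cnt hrest hpre hInv hk
    simp only [checkALoop]
    by_cases hbr : ((PySem.List.bisectRight vals num : Nat) : Int) ≤ ((PySem.List.bisectRight vals (num + th) : Nat) : Int) - 1
    · rw [if_pos hbr]
      have hq1 := A_query hs bit prefixL hpre hInv (num + th)
      have hq2 := A_query hs bit prefixL hpre hInv num
      have hrq : fwRangeQuery (vals.length : Int) bit ((PySem.List.bisectRight vals num : Nat) : Int) (((PySem.List.bisectRight vals (num + th) : Nat) : Int) - 1)
          = (prefixL.countP (fun v => decide (v ≤ num + th)) : Int) - (prefixL.countP (fun v => decide (v ≤ num)) : Int) := by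
        rw [fwRangeQuery, if_neg (by omega), hq1, hq2]
      rw [hrq]
      have hmono := count_mono (prefixL := prefixL) (num := num) hth
      rw [if_pos (by omega)]
    · rw [if_neg hbr]
      exact ih (num :: prefixL) _ cnt (fun x hx => hrest x (by simp [hx]))
        (fun x hx => by
          rcases List.mem_cons.mp hx with rfl | hx'
          · exact hrest x (by simp)
          · exact hpre x hx')
        (step_inv hInv) hk

-- the two check loops agree
theorem checkLoop_eq {vals : List Int} (hs : List.Pairwise (· ≤ ·) vals) {k th : Int}
    (hth : 0 ≤ th) :
    ∀ (rest prefixL bit seen : List Int) (cnt : Int),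
    (∀ x ∈ rest, x ∈ vals) → (∀ x ∈ prefixL, x ∈ vals) →
    fwInv vals.length bit (prefixL.map (fun x => PySem.List.bisectLeft vals x + 1)) →
    List.Pairwise (· ≤ ·) seen → seen.Perm prefixL →
    checkALoop vals k th (vals.length : Int) rest bit cnt = checkBLoop k th rest seen cnt := by
  intro rest
  induction rest with
  | nil => intro prefixL bit seen cnt _ _ _ _ _; rfl
  | cons num rest ih =>
    intro prefixL bit seen cnt hrest hpre hInv hsee hperm
    have hnum : num ∈ vals := hrest num (by simp)
    simp only [checkALoop, checkBLoop]
    have hbseen : ∀ y : Int, (PySem.List.bisectRight seen y : Nat) = prefixL.countP (fun v => decide (v ≤ y)) := by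
      intro y
      rw [bisectRight_eq_countP hsee y]
      exact hperm.countP_eq _
    have hmono := count_mono (prefixL := prefixL) (num := num) hth
    -- new states
    have hseen' := insort_sorted_perm hsee num
    have hperm' : (PySem.List.insert seen ((PySem.List.bisectRight seen num : Nat) : Int) num).Perm (num :: prefixL) :=
      hseen'.2.trans (List.Perm.cons num hperm)
    have hrest' : ∀ x ∈ rest, x ∈ vals := fun x hx => hrest x (by simp [hx])
    have hpre' : ∀ x ∈ num :: prefixL, x ∈ vals := fun x hx => by
      rcases List.mem_cons.mp hx with rfl | hx'
      · exact hnum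
      · exact hpre x hx'
    by_cases hbr : ((PySem.List.bisectRight vals num : Nat) : Int) ≤ ((PySem.List.bisectRight vals (num + th) : Nat) : Int) - 1
    · rw [if_pos hbr]
      have hq1 := A_query hs bit prefixL hpre hInv (num + th)
      have hq2 := A_query hs bit prefixL hpre hInv num
      have hrq : fwRangeQuery (vals.length : Int) bit ((PySem.List.bisectRight vals num : Nat) : Int) (((PySem.List.bisectRight vals (num + th) : Nat) : Int) - 1)
          = (prefixL.countP (fun v => decide (v ≤ num + th)) : Int) - (prefixL.countP (fun v => decide (v ≤ num)) : Int) := by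
        rw [fwRangeQuery, if_neg (by omega), hq1, hq2]
      have hbi : ((PySem.List.bisectRight seen (num + th) : Nat) : Int) - ((PySem.List.bisectRight seen num : Nat) : Int)
          = (prefixL.countP (fun v => decide (v ≤ num + th)) : Int) - (prefixL.countP (fun v => decide (v ≤ num)) : Int) := by
        rw [hbseen (num + th), hbseen num]
      rw [hrq, hbi]
      by_cases hck : cnt + ((prefixL.countP (fun v => decide (v ≤ num + th)) : Int) - (prefixL.countP (fun v => decide (v ≤ num)) : Int)) ≥ k
      · rw [if_pos hck, if_pos hck]
      · rw [if_neg hck, if_neg hck]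
        exact ih (num :: prefixL) _ _ _ hrest' hpre' (step_inv hInv) hseen'.1 hperm'
    · rw [if_neg hbr]
      -- here the B increment is 0
      have hba : PySem.List.bisectRight vals (num + th) ≤ PySem.List.bisectRight vals num := by omega
      have hcnt0 : prefixL.countP (fun v => decide (v ≤ num + th)) = prefixL.countP (fun v => decide (v ≤ num)) :=
        List.countP_congr (fun x hx => by rw [no_mid hs hth hba x (hpre x hx)])
      have hz : ((PySem.List.bisectRight seen (num + th) : Nat) : Int) - ((PySem.List.bisectRight seen num : Nat) : Int) = 0 := by
        rw [hbseen (num + th), hbseen num, hcnt0]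
        ring
      rw [hz, add_zero]
      by_cases hck : cnt ≥ k
      · rw [if_pos hck]
        exact checkALoop_true hs hth rest (num :: prefixL) _ cnt hrest' hpre' (step_inv hInv) hck
      · rw [if_neg hck]
        exact ih (num :: prefixL) _ _ _ hrest' hpre' (step_inv hInv) hseen'.1 hperm'

theorem check_eq (nums : List Int) (k th : Int) (hth : 0 ≤ th) :
    checkA nums k th = checkB nums k th := by
  unfold checkA checkB
  have hsl := PySem.List.sorted_ofList_pairwise_lt (xs := nums)
  have hs : List.Pairwise (· ≤ ·) (PySem.List.sorted (PySem.Set.ofList nums) (fun x => x) false) :=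
    hsl.imp (fun h => le_of_lt h)
  have hmem : ∀ x ∈ nums, x ∈ PySem.List.sorted (PySem.Set.ofList nums) (fun x => x) false := by
    intro x hx
    rw [PySem.List.mem_sorted, PySem.Set.mem_ofList]
    exact hx
  exact checkLoop_eq hs hth nums [] _ [] 0 hmem (by simp) (by simpa using fwInv_init _)
    (by simp) (by simp)

theorem bsLoop_eq (nums : List Int) (k : Int) : ∀ (fuel : Nat) (lo hi ans : Int), 0 ≤ lo →
    bsLoopA nums k lo hi ans fuel = bsLoopB nums k lo hi ans fuel := by
  intro fuel
  induction fuel with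
  | zero => intro lo hi ans _; rfl
  | succ fuel ih =>
    intro lo hi ans hlo
    simp only [bsLoopA, bsLoopB]
    by_cases hlh : lo ≤ hi
    · rw [if_pos hlh, if_pos hlh]
      have hmid := PySem.Int.floordiv_two_mid_bounds hlh
      rw [check_eq nums k _ (by omega)]
      by_cases hc : checkB nums k (PySem.Int.floordiv (lo + hi) 2) = true
      · rw [if_pos hc, if_pos hc]
        exact ih _ _ _ (by omega)
      · rw [if_neg hc, if_neg hc]
        exact ih _ _ _ (by omega)
    · rw [if_neg hlh, if_neg hlh]

theorem minThreshold_eq_alt (nums : List Int) (k : Int) :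
    minThreshold nums k = minThreshold_alt nums k := by
  unfold minThreshold minThreshold_alt
  match nums with
  | [] => rfl
  | x :: t => exact bsLoop_eq (x :: t) k _ 0 _ (-1) le_rfl

-- ===== VERDICT (by name: the statement is the Claim_ definition above) =====
theorem minThreshold_spec : Claim_equal_minThreshold := by
  intro nums k _
  unfold Spec_minThreshold
  exact minThreshold_eq_alt nums k
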